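-- pv_equiv track=rewrite | github.com/Kesendo/R-equals-C-Psi-squared | simulations/_pi2_odd_general_closed_form.py | first_pair
-- ===== SOURCE A (Python) =====
-- def first_pair(N, n_p, n_q, hd):
--     for p in range(2**N):
--         if bin(p).count('1') != n_p:
--             continue
--         for q in range(2**N):
--             if bin(q).count('1') != n_q:
--                 continue
--             if p == q:
--                 continue
--             if bin(p ^ q).count('1') == hd:
--                 return p, q
--     return None, None
-- ===== SOURCE B (Python) =====
-- def first_pair(N, n_p, n_q, hd):
--     # Closed form: the answer's p is the smallest N-bit number with n_p set bits,
--     # i.e. the low n_p bits; feasibility of q depends only on popcounts, and the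
--     # smallest valid q is built directly from the forced flip counts.
--     if n_p < 0 or n_p > N or n_q < 0 or n_q > N or hd <= 0:
--         return None, None
--     t = n_p + hd - n_q
--     if t % 2 != 0:
--         return None, None
--     k = t // 2                 # ones of p flipped off
--     h = hd - k                 # zeros of p flipped on
--     if k < 0 or k > n_p or h < 0 or h > N - n_p:
--         return None, None
--     p = (1 << n_p) - 1
--     q = (((1 << h) - 1) << n_p) + ((1 << (n_p - k)) - 1)
--     return p, q
-- ===== Notes on version B (the rewrite author's own statement) =====
-- stated objective: faster
-- what changed: Replaces A's brute-force double scan over all 2^N x 2^N bit-masks with a closed form: solve the popcount/hamming constraints for the forced flip counts k,h and build the smallest p (low n_p bits) and smallest q directly. Intended as faster (O(N) arithmetic vs exponential scan); measured: A timed out already at N=16 where B returned, so no finite ratio could be clocked.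
-- crash fix: For N < 0, A raises TypeError (2**N is a float, which range() rejects); B returns (None, None). — e.g. on first_pair(-1, 0, 0, 1): A raises TypeError, B returns (none, none)
import Mathlib
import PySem

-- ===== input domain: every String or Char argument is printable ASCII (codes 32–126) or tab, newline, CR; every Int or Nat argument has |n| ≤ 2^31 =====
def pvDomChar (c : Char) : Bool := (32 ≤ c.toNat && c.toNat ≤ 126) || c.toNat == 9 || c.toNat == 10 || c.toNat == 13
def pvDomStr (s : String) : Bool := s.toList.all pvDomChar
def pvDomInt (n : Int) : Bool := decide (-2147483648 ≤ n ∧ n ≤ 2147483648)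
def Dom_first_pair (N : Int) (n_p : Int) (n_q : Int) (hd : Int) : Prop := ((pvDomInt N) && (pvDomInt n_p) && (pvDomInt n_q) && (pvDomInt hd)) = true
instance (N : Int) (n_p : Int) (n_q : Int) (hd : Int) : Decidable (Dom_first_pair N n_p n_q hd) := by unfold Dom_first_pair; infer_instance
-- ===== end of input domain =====

-- B replaces A's exhaustive double scan over bit-masks by solving the popcount/hamming
-- constraints for the forced flip counts and building the smallest p and q directly
-- (objective: faster — intended; measured: A timed out at N=16 where B returned).

-- ===== PORT A =====
-- bin(x).count('1') is the popcount of |x|, i.e. PySem.Int.bitCount; p ^ q is PySem.Int.bxor.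
-- 2**N (N ≥ 0 by Pre_) is 2^N.toNat, exact on Pre_.
-- A 'for v in range(M): ... return r ...' loop is the counting recursion pvWhile f M v
-- (first some wins, else advance), proved equal to findSome? over PySem.List.pyRange below.
def pvWhile {α : Type} (f : Int → Option α) (M q : Int) : Option α :=
  if _h : q < M then
    match f q with
    | some r => some r
    | none => pvWhile f M (q + 1)
  else none
termination_by (M - q).toNat
decreasing_by omega

def first_pair (N : Int) (n_p : Int) (n_q : Int) (hd : Int) : Option Int × Option Int :=
  match pvWhile (fun p =>
    if (PySem.Int.bitCount p : Int) ≠ n_p then none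
    else pvWhile (fun q =>
      if (PySem.Int.bitCount q : Int) ≠ n_q then none
      else if p = q then none
      else if (PySem.Int.bitCount (PySem.Int.bxor p q) : Int) = hd then some (p, q)
      else none) ((2:Int) ^ N.toNat) 0) ((2:Int) ^ N.toNat) 0 with
  | some (p, q) => (some p, some q)
  | none => (none, none)

-- ===== PORT B =====
def first_pair_alt (N : Int) (n_p : Int) (n_q : Int) (hd : Int) : Option Int × Option Int :=
  if n_p < 0 ∨ n_p > N ∨ n_q < 0 ∨ n_q > N ∨ hd ≤ 0 then (none, none)
  else
    let t := n_p + hd - n_q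
    if PySem.Int.mod t 2 ≠ 0 then (none, none)
    else
      let k := PySem.Int.floordiv t 2
      let h := hd - k
      if k < 0 ∨ k > n_p ∨ h < 0 ∨ h > N - n_p then (none, none)
      else
        let p := ((1 : Int) <<< n_p.toNat) - 1
        let q := ((((1:Int) <<< h.toNat) - 1) <<< n_p.toNat) + (((1:Int) <<< (n_p - k).toNat) - 1)
        (some p, some q)

-- ===== PRECONDITION & SPEC =====
-- Pre_ excludes exactly N < 0, where Python A raises TypeError (range(2**N) on a float).
def Pre_first_pair (N : Int) (n_p : Int) (n_q : Int) (hd : Int) : Prop := 0 ≤ N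
instance (N : Int) (n_p : Int) (n_q : Int) (hd : Int) : Decidable (Pre_first_pair N n_p n_q hd) := by unfold Pre_first_pair; infer_instance
def pvWitness_first_pair : Int × Int × Int × Int := (3, 2, 1, 1)

-- For N < 0, A raises TypeError (2**N is a float, range() rejects it); B returns (None, None).
def Raises_first_pair (N : Int) (n_p : Int) (n_q : Int) (hd : Int) : Prop := N < 0
instance (N : Int) (n_p : Int) (n_q : Int) (hd : Int) : Decidable (Raises_first_pair N n_p n_q hd) := by unfold Raises_first_pair; infer_instance
def pvRaiseWitness_first_pair : Int × Int × Int × Int := (-1, 0, 0, 1)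
def pvRaiseWitnessOut_first_pair : Option Int × Option Int := (none, none)

def Spec_first_pair (N : Int) (n_p : Int) (n_q : Int) (hd : Int) (out : Option Int × Option Int) : Prop := out = first_pair_alt N n_p n_q hd
instance (N : Int) (n_p : Int) (n_q : Int) (hd : Int) (out : Option Int × Option Int) : Decidable (Spec_first_pair N n_p n_q hd out) := by unfold Spec_first_pair; infer_instance

-- ===== CLAIM (what is proved, stated in full; the proofs are below) =====
def Claim_equal_first_pair : Prop := ∀ (N : Int) (n_p : Int) (n_q : Int) (hd : Int), Dom_first_pair N n_p n_q hd → Pre_first_pair N n_p n_q hd → Spec_first_pair N n_p n_q hd (first_pair N n_p n_q hd)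
def Claim_raises_first_pair : Prop := (∀ (N : Int) (n_p : Int) (n_q : Int) (hd : Int), Dom_first_pair N n_p n_q hd → Raises_first_pair N n_p n_q hd → ¬ Pre_first_pair N n_p n_q hd) ∧ (Dom_first_pair (pvRaiseWitness_first_pair.1) (pvRaiseWitness_first_pair.2.1) (pvRaiseWitness_first_pair.2.2.1) (pvRaiseWitness_first_pair.2.2.2) ∧ Raises_first_pair (pvRaiseWitness_first_pair.1) (pvRaiseWitness_first_pair.2.1) (pvRaiseWitness_first_pair.2.2.1) (pvRaiseWitness_first_pair.2.2.2) ∧ first_pair_alt (pvRaiseWitness_first_pair.1) (pvRaiseWitness_first_pair.2.1) (pvRaiseWitness_first_pair.2.2.1) (pvRaiseWitness_first_pair.2.2.2) = pvRaiseWitnessOut_first_pair)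

-- ===== LEMMAS AND PROOFS =====

-- Popcount of a natural number, as computed by bin(·).count('1') / PySem.Int.bitCount.
def pvPC (m : Nat) : Nat := PySem.Int.bitCount (m : Int)

lemma pvPC_zero : pvPC 0 = 0 := PySem.Int.bitCount_zero

lemma pvPC_rec (m : Nat) (h : 0 < m) : pvPC m = m % 2 + pvPC (m / 2) :=
  PySem.Int.bitCount_natCast h

-- number of indices below n where f holds
def pvCnt (n : Nat) (f : Nat → Bool) : Nat := ∑ i ∈ Finset.range n, (if f i then 1 else 0)

lemma pvCnt_congr (n : Nat) (f g : Nat → Bool) (h : ∀ i < n, f i = g i) :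
    pvCnt n f = pvCnt n g := by
  unfold pvCnt
  exact Finset.sum_congr rfl (fun i hi => by rw [h i (Finset.mem_range.mp hi)])

lemma pvPC_eq_cnt {n m : Nat} (h : m < 2 ^ n) : pvPC m = pvCnt n m.testBit := by
  induction n generalizing m with
  | zero =>
    have : m = 0 := by simpa using h
    subst this; simp [pvPC_zero, pvCnt]
  | succ n ih =>
    rcases Nat.eq_zero_or_pos m with h0 | h0
    · subst h0
      simp [pvPC_zero, pvCnt, Nat.zero_testBit]
    · have hdiv : m / 2 < 2 ^ n := by
        have : m < 2 ^ n * 2 := by rw [← pow_succ]; exact h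
        omega
      have hrec := pvPC_rec m h0
      have hIH := ih hdiv
      unfold pvCnt
      rw [Finset.sum_range_succ']
      have hbit : ∀ i, m.testBit (i + 1) = (m / 2).testBit i := by
        intro i; rw [Nat.testBit_succ]
      have h1 : (∑ i ∈ Finset.range n, (if m.testBit (i + 1) then 1 else 0))
          = pvCnt n (m / 2).testBit := by
        unfold pvCnt
        exact Finset.sum_congr rfl (fun i _ => by rw [hbit i])
      rw [h1, ← hIH, hrec]
      have h2 : (if m.testBit 0 then 1 else 0) = m % 2 := by
        rw [Nat.testBit_zero]
        rcases Nat.mod_two_eq_zero_or_one m with h | h <;> simp [h]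
      omega

lemma pvPC_min (m : Nat) : 2 ^ (pvPC m) - 1 ≤ m := by
  induction m using Nat.strong_induction_on with
  | _ m ih =>
    rcases Nat.eq_zero_or_pos m with h | h
    · subst h; simp [pvPC_zero]
    · have h2 : m / 2 < m := Nat.div_lt_self h (by norm_num)
      have hih := ih _ h2
      rw [pvPC_rec m h]
      have hdm := Nat.div_add_mod m 2
      rcases Nat.mod_two_eq_zero_or_one m with hm | hm
      · rw [hm, Nat.zero_add]
        have h1 : (1 : Nat) ≤ 2 ^ pvPC (m / 2) := Nat.one_le_two_pow
        omega
      · rw [hm]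
        have hpow : 2 ^ (1 + pvPC (m / 2)) = 2 * 2 ^ pvPC (m / 2) := by
          rw [pow_add, pow_one]
        rw [hpow]
        omega

lemma pvPC_pow_sub_one (a : Nat) : pvPC (2 ^ a - 1) = a := by
  induction a with
  | zero => simp [pvPC_zero]
  | succ a ih =>
    have ht : (1 : Nat) ≤ 2 ^ a := Nat.one_le_two_pow
    have hpow : 2 ^ (a + 1) = 2 * 2 ^ a := by rw [pow_succ]; ring
    have h0 : 0 < 2 ^ (a + 1) - 1 := by omega
    rw [pvPC_rec _ h0]
    have hmod : (2 ^ (a + 1) - 1) % 2 = 1 := by omega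
    have hdiv : (2 ^ (a + 1) - 1) / 2 = 2 ^ a - 1 := by omega
    rw [hmod, hdiv, ih]
    omega

lemma pvCnt_le (n : Nat) (f : Nat → Bool) : pvCnt n f ≤ n := by
  unfold pvCnt
  calc (∑ i ∈ Finset.range n, (if f i then 1 else 0))
      ≤ ∑ _i ∈ Finset.range n, 1 :=
        Finset.sum_le_sum (fun i _ => by split <;> omega)
    _ = n := by simp

lemma pvPC_le {n m : Nat} (h : m < 2 ^ n) : pvPC m ≤ n := by
  rw [pvPC_eq_cnt h]; exact pvCnt_le n _

lemma pvPC_pos (m : Nat) (h : 0 < m) : 0 < pvPC m := by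
  induction m using Nat.strong_induction_on with
  | _ m ih =>
    rw [pvPC_rec m h]
    rcases Nat.mod_two_eq_zero_or_one m with hm | hm
    · have h2 : 0 < m / 2 := by omega
      have := ih (m / 2) (Nat.div_lt_self h (by norm_num)) h2
      omega
    · omega

lemma pvCnt_split (n : Nat) (f g : Nat → Bool) :
    pvCnt n f = pvCnt n (fun i => f i && g i) + pvCnt n (fun i => f i && !g i) := by
  unfold pvCnt
  rw [← Finset.sum_add_distrib]
  exact Finset.sum_congr rfl (fun i _ => by cases hf : f i <;> cases hg : g i <;> simp [hf, hg])

lemma pvCnt_bne (n : Nat) (f g : Nat → Bool) :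
    pvCnt n (fun i => f i ^^ g i)
      = pvCnt n (fun i => f i && !g i) + pvCnt n (fun i => !f i && g i) := by
  unfold pvCnt
  rw [← Finset.sum_add_distrib]
  exact Finset.sum_congr rfl (fun i _ => by cases hf : f i <;> cases hg : g i <;> simp [hf, hg])

lemma pvCnt_mono (n : Nat) (f g : Nat → Bool) (h : ∀ i, f i = true → g i = true) :
    pvCnt n f ≤ pvCnt n g := by
  unfold pvCnt
  refine Finset.sum_le_sum (fun i _ => ?_)
  cases hf : f i
  · simp [hf]
  · simp [hf, h i hf]

lemma pvCnt_compl (n : Nat) (f : Nat → Bool) :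
    pvCnt n f + pvCnt n (fun i => !f i) = n := by
  unfold pvCnt
  rw [← Finset.sum_add_distrib]
  have h : ∀ i ∈ Finset.range n,
      ((if f i then (1:Nat) else 0) + if (!f i) then 1 else 0) = 1 := by
    intro i _; cases hf : f i <;> simp [hf]
  rw [Finset.sum_congr rfl h]
  simp

-- General decomposition of two popcounts and the popcount of their xor.
lemma pv_decomp {n p q : Nat} (hp : p < 2 ^ n) (hq : q < 2 ^ n) :
    ∃ K H M : Nat, pvPC p = K + M ∧ pvPC q = H + M ∧ pvPC (p ^^^ q) = K + H ∧
      H + pvPC p ≤ n := by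
  refine ⟨pvCnt n (fun i => p.testBit i && !q.testBit i),
          pvCnt n (fun i => !p.testBit i && q.testBit i),
          pvCnt n (fun i => p.testBit i && q.testBit i), ?_, ?_, ?_, ?_⟩
  · rw [pvPC_eq_cnt hp, pvCnt_split n p.testBit q.testBit]; omega
  · rw [pvPC_eq_cnt hq, pvCnt_split n q.testBit p.testBit]
    rw [pvCnt_congr n (fun i => q.testBit i && p.testBit i) (fun i => p.testBit i && q.testBit i)
          (fun i _ => Bool.and_comm _ _),
        pvCnt_congr n (fun i => q.testBit i && !p.testBit i) (fun i => !p.testBit i && q.testBit i)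
          (fun i _ => Bool.and_comm _ _)]
    omega
  · rw [pvPC_eq_cnt (Nat.xor_lt_two_pow hp hq)]
    rw [pvCnt_congr n (p ^^^ q).testBit (fun i => p.testBit i ^^ q.testBit i)
          (fun i _ => Nat.testBit_xor p q i)]
    exact pvCnt_bne n _ _
  · have h1 : pvCnt n (fun i => !p.testBit i && q.testBit i) ≤ pvCnt n (fun i => !p.testBit i) :=
      pvCnt_mono n _ _ (fun i hi => by revert hi; cases p.testBit i <;> simp)
    have h2 := pvCnt_compl n p.testBit
    rw [pvPC_eq_cnt hp]
    omega

lemma pvCnt_split_at (n a : Nat) (f : Nat → Bool) (ha : a ≤ n) :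
    pvCnt n f = pvCnt a f + ∑ i ∈ Finset.Ico a n, (if f i then 1 else 0) := by
  unfold pvCnt
  rw [Finset.range_eq_Ico]
  exact (Finset.sum_Ico_consecutive _ (Nat.zero_le a) ha).symm

lemma pvCnt_lt_bound {n a : Nat} (ha : a ≤ n) :
    pvCnt n (fun i => decide (i < a)) = a := by
  rw [pvCnt_split_at n a _ ha]
  have h2 : (∑ i ∈ Finset.Ico a n, (if decide (i < a) then (1:Nat) else 0)) = 0 := by
    refine Finset.sum_eq_zero (fun i hi => ?_)
    have := (Finset.mem_Ico.mp hi).1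
    have hna : ¬ (i < a) := by omega
    simp [hna]
  have h1 : pvCnt a (fun i => decide (i < a)) = pvCnt a (fun _ => true) :=
    pvCnt_congr a _ _ (fun i hi => by simp [hi])
  have h3 : pvCnt a (fun _ => true) = a := by unfold pvCnt; simp
  omega

-- count of set bits of q below position a = popcount of q mod 2^a
lemma pvCnt_low {n a q : Nat} (ha : a ≤ n) :
    pvCnt n (fun i => decide (i < a) && q.testBit i) = pvPC (q % 2 ^ a) := by
  have hmod : q % 2 ^ a < 2 ^ a := Nat.mod_lt _ (Nat.two_pow_pos a)
  rw [pvPC_eq_cnt hmod, pvCnt_split_at n a _ ha]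
  have h2 : (∑ i ∈ Finset.Ico a n, (if decide (i < a) && q.testBit i then (1:Nat) else 0)) = 0 := by
    refine Finset.sum_eq_zero (fun i hi => ?_)
    have := (Finset.mem_Ico.mp hi).1
    have hna : ¬ (i < a) := by omega
    simp [hna]
  have h1 : pvCnt a (fun i => decide (i < a) && q.testBit i) = pvCnt a (q % 2 ^ a).testBit :=
    pvCnt_congr a _ _ (fun i hi => by rw [Nat.testBit_mod_two_pow])
  omega

-- count of set bits of q at positions ≥ a = popcount of q / 2^a
lemma pvCnt_high {n a q : Nat} (ha : a ≤ n) (hq : q < 2 ^ n) :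
    pvCnt n (fun i => !decide (i < a) && q.testBit i) = pvPC (q / 2 ^ a) := by
  have hdiv : q / 2 ^ a < 2 ^ (n - a) := by
    rw [Nat.div_lt_iff_lt_mul (Nat.two_pow_pos a), ← pow_add]
    rwa [Nat.sub_add_cancel ha]
  rw [pvPC_eq_cnt hdiv, pvCnt_split_at n a _ ha]
  have h1 : pvCnt a (fun i => !decide (i < a) && q.testBit i) = pvCnt a (fun _ => false) :=
    pvCnt_congr a _ _ (fun i hi => by simp [hi])
  have h1' : pvCnt a (fun _ => false) = 0 := by unfold pvCnt; simp
  have h2 : (∑ i ∈ Finset.Ico a n, (if !decide (i < a) && q.testBit i then (1:Nat) else 0))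
      = pvCnt (n - a) (q / 2 ^ a).testBit := by
    rw [Finset.sum_Ico_eq_sum_range]
    unfold pvCnt
    refine Finset.sum_congr rfl (fun i _ => ?_)
    have h3 : ¬ (a + i < a) := by omega
    have h4 : (q / 2 ^ a).testBit i = q.testBit (i + a) := Nat.testBit_div_two_pow q i
    have h5 : a + i = i + a := by omega
    rw [h4]
    simp [h3, h5]
  omega

lemma pv_split_q {n a q : Nat} (ha : a ≤ n) (hq : q < 2 ^ n) :
    pvPC q = pvPC (q % 2 ^ a) + pvPC (q / 2 ^ a) := by
  rw [pvPC_eq_cnt hq, pvCnt_split n q.testBit (fun i => decide (i < a))]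
  rw [pvCnt_congr n (fun i => q.testBit i && decide (i < a))
        (fun i => decide (i < a) && q.testBit i) (fun i _ => Bool.and_comm _ _),
      pvCnt_congr n (fun i => q.testBit i && !decide (i < a))
        (fun i => !decide (i < a) && q.testBit i) (fun i _ => Bool.and_comm _ _)]
  rw [pvCnt_low ha, pvCnt_high ha hq]

-- popcount of (2^a - 1) xor q, for q < 2^n, a ≤ n
lemma pv_p0_xor {n a q : Nat} (ha : a ≤ n) (hq : q < 2 ^ n) :
    pvPC ((2 ^ a - 1) ^^^ q) = (a - pvPC (q % 2 ^ a)) + pvPC (q / 2 ^ a) := by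
  have hp0 : 2 ^ a - 1 < 2 ^ n := by
    have : (2:Nat) ^ a ≤ 2 ^ n := Nat.pow_le_pow_right (by norm_num) ha
    have : (1:Nat) ≤ 2 ^ a := Nat.one_le_two_pow
    omega
  rw [pvPC_eq_cnt (Nat.xor_lt_two_pow hp0 hq)]
  rw [pvCnt_congr n _ (fun i => decide (i < a) ^^ q.testBit i)
        (fun i _ => by rw [Nat.testBit_xor, Nat.testBit_two_pow_sub_one])]
  rw [pvCnt_bne]
  have hsplit := pvCnt_split n (fun i => decide (i < a)) q.testBit
  rw [pvCnt_lt_bound ha, pvCnt_low ha] at hsplit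
  have hlow := pvCnt_low (n := n) (a := a) (q := q) ha
  have hhigh := pvCnt_high (n := n) (a := a) (q := q) ha hq
  rw [hhigh]
  omega

-- Nat-indexed forms of port A's two loops
def pvInnerN (m : Nat) (n_q hd : Int) (pn : Nat) : Option (Int × Int) :=
  (List.range m).findSome? (fun qn =>
    if (pvPC qn : Int) ≠ n_q then none
    else if pn = qn then none
    else if (pvPC (pn ^^^ qn) : Int) = hd then some ((pn : Int), (qn : Int)) else none)

def pvOuterN (m : Nat) (n_p n_q hd : Int) : Option (Int × Int) :=
  (List.range m).findSome? (fun pn =>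
    if (pvPC pn : Int) ≠ n_p then none else pvInnerN m n_q hd pn)

lemma pvWhile_eq {α : Type} (f : Int → Option α) (M q : Int) :
    pvWhile f M q = (PySem.List.pyRange q M 1).findSome? f := by
  induction q using pvWhile.induct (f := f) (M := M) with
  | case1 q h r hr =>
    rw [pvWhile, dif_pos h, hr, PySem.List.pyRange_one_cons h, List.findSome?_cons, hr]
  | case2 q h hr ih =>
    rw [pvWhile, dif_pos h, hr, PySem.List.pyRange_one_cons h, List.findSome?_cons, hr, ih]
  | case3 q h =>
    rw [pvWhile, dif_neg h, PySem.List.pyRange_one_eq_nil (by omega)]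
    rfl

lemma pvA_eq (N n_p n_q hd : Int) :
    pvWhile (fun p =>
      if (PySem.Int.bitCount p : Int) ≠ n_p then none
      else pvWhile (fun q =>
        if (PySem.Int.bitCount q : Int) ≠ n_q then none
        else if p = q then none
        else if (PySem.Int.bitCount (PySem.Int.bxor p q) : Int) = hd then some (p, q)
        else none) ((2:Int) ^ N.toNat) 0) ((2:Int) ^ N.toNat) 0
    = pvOuterN (2 ^ N.toNat) n_p n_q hd := by
  have hpow : ((2:Int) ^ N.toNat) = ((2 ^ N.toNat : Nat) : Int) := by push_cast; ring
  unfold pvOuterN pvInnerN pvPC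
  simp only [pvWhile_eq, hpow, PySem.List.pyRange_one, List.findSome?_map, Function.comp_def,
    zero_add, Int.sub_zero, Int.toNat_natCast, PySem.Int.bxor_natCast, Nat.cast_inj]

-- findSome? over range finds the first hit
lemma pv_findSome_range_first {α : Type} (f : Nat → Option α) (m x0 : Nat) (r : α)
    (hx : x0 < m) (hnone : ∀ x < x0, f x = none) (hsome : f x0 = some r) :
    (List.range m).findSome? f = some r := by
  have hm : m = x0 + (m - x0) := by omega
  rw [hm, List.range_add, List.findSome?_append]
  have h1 : (List.range x0).findSome? f = none :=
    List.findSome?_eq_none_iff.mpr (fun x hxm => hnone x (List.mem_range.mp hxm))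
  rw [h1]
  have hk : m - x0 = (m - x0 - 1) + 1 := by omega
  rw [hk, List.range_succ_eq_map]
  simp [hsome]

-- A's search returns none when no admissible pair exists at all
lemma pvOuterN_eq_none {n : Nat} {n_p n_q hd : Int}
    (h : ∀ pn qn : Nat, pn < 2 ^ n → qn < 2 ^ n → (pvPC pn : Int) = n_p →
      (pvPC qn : Int) = n_q → pn ≠ qn → (pvPC (pn ^^^ qn) : Int) ≠ hd) :
    pvOuterN (2 ^ n) n_p n_q hd = none := by
  unfold pvOuterN pvInnerN
  rw [List.findSome?_eq_none_iff]
  intro pn hpn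
  have hpn' : pn < 2 ^ n := List.mem_range.mp hpn
  by_cases h1 : (pvPC pn : Int) ≠ n_p
  · simp [h1]
  · rw [if_neg h1, List.findSome?_eq_none_iff]
    push_neg at h1
    intro qn hqn
    have hqn' : qn < 2 ^ n := List.mem_range.mp hqn
    by_cases h2 : (pvPC qn : Int) ≠ n_q
    · simp [h2]
    · push_neg at h2
      rw [if_neg (by simpa using h2)]
      by_cases h3 : pn = qn
      · simp [h3]
      · rw [if_neg h3, if_neg (h pn qn hpn' hqn' h1 h2 h3)]

-- A's search finds exactly the pair B constructs, in the feasible case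
lemma pvOuterN_feasible {n a b d k0 h0 m0 : Nat}
    (ha : a ≤ n) (e1 : a = k0 + m0) (e2 : b = h0 + m0) (e3 : d = k0 + h0)
    (e4 : h0 + a ≤ n) (hd0 : 0 < d) :
    pvOuterN (2 ^ n) (a : Int) (b : Int) (d : Int)
      = some (((2 ^ a - 1 : Nat) : Int), (((2 ^ h0 - 1) * 2 ^ a + (2 ^ m0 - 1) : Nat) : Int)) := by
  have hm0a : m0 ≤ a := by omega
  have h2a : (1:Nat) ≤ 2 ^ a := Nat.one_le_two_pow
  have h2h : (1:Nat) ≤ 2 ^ h0 := Nat.one_le_two_pow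
  have h2m : (1:Nat) ≤ 2 ^ m0 := Nat.one_le_two_pow
  have hman : (2:Nat) ^ a ≤ 2 ^ n := Nat.pow_le_pow_right (by norm_num) ha
  have hm0lt : (2:Nat) ^ m0 ≤ 2 ^ a := Nat.pow_le_pow_right (by norm_num) hm0a
  have hp0 : 2 ^ a - 1 < 2 ^ n := by omega
  have hq0sum : (2:Nat) ^ h0 * 2 ^ a ≤ 2 ^ n := by
    rw [← pow_add]; exact Nat.pow_le_pow_right (by norm_num) e4
  have hsubmul : ((2:Nat) ^ h0 - 1) * 2 ^ a = 2 ^ h0 * 2 ^ a - 2 ^ a := by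
    rw [Nat.sub_mul, one_mul]
  have hq0 : (2 ^ h0 - 1) * 2 ^ a + (2 ^ m0 - 1) < 2 ^ n := by omega
  -- mod/div structure of q0
  have hq0mod : ((2 ^ h0 - 1) * 2 ^ a + (2 ^ m0 - 1)) % 2 ^ a = 2 ^ m0 - 1 := by
    rw [Nat.mul_add_mod']
    exact Nat.mod_eq_of_lt (by omega)
  have hq0div : ((2 ^ h0 - 1) * 2 ^ a + (2 ^ m0 - 1)) / 2 ^ a = 2 ^ h0 - 1 := by
    rw [mul_comm, Nat.mul_add_div (Nat.two_pow_pos a), Nat.div_eq_of_lt (by omega)]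
    omega
  unfold pvOuterN
  apply pv_findSome_range_first _ _ (2 ^ a - 1) _ hp0
  · intro x hx
    have hne : (pvPC x : Int) ≠ (a : Int) := by
      intro hc
      have hxa : pvPC x = a := by exact_mod_cast hc
      have := pvPC_min x
      rw [hxa] at this
      omega
    simp [hne]
  · rw [if_neg (by rw [pvPC_pow_sub_one]; simp)]
    unfold pvInnerN
    apply pv_findSome_range_first _ _ ((2 ^ h0 - 1) * 2 ^ a + (2 ^ m0 - 1)) _ hq0
    · intro y hy
      by_cases c1 : (pvPC y : Int) ≠ (b : Int)
      · simp [c1]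
      · push_neg at c1
        have hyb : pvPC y = b := by exact_mod_cast c1
        rw [if_neg (by simpa using c1)]
        by_cases c2 : 2 ^ a - 1 = y
        · simp [c2]
        · rw [if_neg c2]
          have hylt : y < 2 ^ n := by omega
          have hxorv := pv_p0_xor (n := n) (a := a) (q := y) ha hylt
          have hsplit := pv_split_q (n := n) (a := a) (q := y) ha hylt
          have hlle : pvPC (y % 2 ^ a) ≤ a :=
            pvPC_le (Nat.mod_lt _ (Nat.two_pow_pos a))
          rw [if_neg]
          intro hc
          have hdv : pvPC ((2 ^ a - 1) ^^^ y) = d := by exact_mod_cast hc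
          rw [hxorv] at hdv
          rw [hyb] at hsplit
          have hpl : pvPC (y % 2 ^ a) = m0 := by omega
          have hph : pvPC (y / 2 ^ a) = h0 := by omega
          have hge1 := pvPC_min (y / 2 ^ a)
          have hge2 := pvPC_min (y % 2 ^ a)
          rw [hph] at hge1
          rw [hpl] at hge2
          have emul : ((2:Nat) ^ h0 - 1) * 2 ^ a ≤ (y / 2 ^ a) * 2 ^ a :=
            Nat.mul_le_mul_right _ hge1
          have edm : (y / 2 ^ a) * 2 ^ a + y % 2 ^ a = y := by
            rw [mul_comm]; exact Nat.div_add_mod y (2 ^ a)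
          omega
    · have hqb : pvPC ((2 ^ h0 - 1) * 2 ^ a + (2 ^ m0 - 1)) = b := by
        rw [pv_split_q (n := n) (a := a) ha hq0, hq0mod, hq0div,
          pvPC_pow_sub_one, pvPC_pow_sub_one]
        omega
      have hxord : pvPC ((2 ^ a - 1) ^^^ ((2 ^ h0 - 1) * 2 ^ a + (2 ^ m0 - 1))) = d := by
        rw [pv_p0_xor (n := n) (a := a) ha hq0, hq0mod, hq0div,
          pvPC_pow_sub_one, pvPC_pow_sub_one]
        omega
      have hne : 2 ^ a - 1 ≠ (2 ^ h0 - 1) * 2 ^ a + (2 ^ m0 - 1) := by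
        intro hc
        rw [hc, Nat.xor_self, pvPC_zero] at hxord
        omega
      rw [if_neg (by rw [hqb]; simp), if_neg hne, if_pos (by rw [hxord])]

-- ===== VERDICT (by name: the statement is the Claim_ definition above) =====
theorem first_pair_spec : Claim_equal_first_pair := by
  intro N n_p n_q hd _ hpre
  unfold Pre_first_pair at hpre
  unfold Spec_first_pair
  have hA : first_pair N n_p n_q hd = match pvOuterN (2 ^ N.toNat) n_p n_q hd with
    | some (p, q) => (some p, some q)
    | none => (none, none) := by
    unfold first_pair
    rw [pvA_eq]
  have hNn : (N.toNat : Int) = N := Int.toNat_of_nonneg hpre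
  by_cases hmain : 0 ≤ n_p ∧ n_p ≤ N ∧ 0 ≤ n_q ∧ n_q ≤ N ∧ 0 < hd
  · obtain ⟨hp0, hpN, hq0, hqN, hd5⟩ := hmain
    have hcp : ((n_p.toNat : Nat) : Int) = n_p := Int.toNat_of_nonneg hp0
    have hcq : ((n_q.toNat : Nat) : Int) = n_q := Int.toNat_of_nonneg hq0
    have hcd : ((hd.toNat : Nat) : Int) = hd := Int.toNat_of_nonneg (by omega)
    by_cases hF : ∃ K H M : Nat, n_p.toNat = K + M ∧ n_q.toNat = H + M ∧
        hd.toNat = K + H ∧ H + n_p.toNat ≤ N.toNat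
    · obtain ⟨k0, h0, m0, e1, e2, e3, e4⟩ := hF
      have ha : n_p.toNat ≤ N.toNat := by omega
      have hfeas := pvOuterN_feasible (n := N.toNat) ha e1 e2 e3 e4 (by omega)
      rw [hcp, hcq, hcd] at hfeas
      rw [hA, hfeas]
      simp only [first_pair_alt]
      rw [if_neg (by omega)]
      have hmod : PySem.Int.mod (n_p + hd - n_q) 2 = 0 := by
        rw [PySem.Int.mod_eq_emod_of_pos (by norm_num)]
        omega
      rw [if_neg (fun hcon => hcon hmod)]
      have hdiv : PySem.Int.floordiv (n_p + hd - n_q) 2 = (k0 : Int) := by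
        rw [PySem.Int.floordiv_eq_ediv_of_pos (by norm_num)]
        omega
      rw [hdiv]
      rw [if_neg (by omega)]
      have hth : (hd - (k0 : Int)).toNat = h0 := by omega
      have htm : (n_p - (k0 : Int)).toNat = m0 := by omega
      rw [hth, htm]
      have h2h : (1:Nat) ≤ 2 ^ h0 := Nat.one_le_two_pow
      have h2m : (1:Nat) ≤ 2 ^ m0 := Nat.one_le_two_pow
      have h2a : (1:Nat) ≤ 2 ^ n_p.toNat := Nat.one_le_two_pow
      have hv1 : ((2 ^ n_p.toNat - 1 : Nat) : Int) = (1:Int) <<< n_p.toNat - 1 := by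
        rw [Int.shiftLeft_eq, one_mul, Nat.cast_sub h2a]
        push_cast
        ring
      have hv2 : (((2 ^ h0 - 1) * 2 ^ n_p.toNat + (2 ^ m0 - 1) : Nat) : Int)
          = ((1:Int) <<< h0 - 1) <<< n_p.toNat + ((1:Int) <<< m0 - 1) := by
        rw [Int.shiftLeft_eq, Int.shiftLeft_eq, Int.shiftLeft_eq, one_mul, one_mul,
          Nat.cast_add, Nat.cast_mul, Nat.cast_sub h2h, Nat.cast_sub h2m]
        push_cast
        ring
      rw [hv1, hv2]
    · have hAnone : pvOuterN (2 ^ N.toNat) n_p n_q hd = none := by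
        apply pvOuterN_eq_none
        intro pn qn hpn hqn hpa hqb hne hdx
        obtain ⟨K, H, M, d1, d2, d3, d4⟩ := pv_decomp hpn hqn
        exact absurd ⟨K, H, M, by omega, by omega, by omega, by omega⟩ hF
      rw [hA, hAnone]
      simp only [first_pair_alt]
      rw [if_neg (by omega)]
      by_cases hm2 : PySem.Int.mod (n_p + hd - n_q) 2 ≠ 0
      · rw [if_pos hm2]
      · push_neg at hm2
        rw [if_neg (fun hcon => hcon hm2)]
        have hmod' : (n_p + hd - n_q) % 2 = 0 := by
          rwa [PySem.Int.mod_eq_emod_of_pos (by norm_num)] at hm2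
        rw [PySem.Int.floordiv_eq_ediv_of_pos (by norm_num)]
        rw [if_pos]
        by_contra hg
        push_neg at hg
        obtain ⟨hg1, hg2, hg3, hg4⟩ := hg
        exact absurd ⟨((n_p + hd - n_q) / 2).toNat, (hd - (n_p + hd - n_q) / 2).toNat,
          (n_p - (n_p + hd - n_q) / 2).toNat, by omega, by omega, by omega, by omega⟩ hF
  · have hAnone : pvOuterN (2 ^ N.toNat) n_p n_q hd = none := by
      apply pvOuterN_eq_none
      intro pn qn hpn hqn hpa hqb hne hdx
      apply hmain
      have hc1 : pvPC pn ≤ N.toNat := pvPC_le hpn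
      have hc2 : pvPC qn ≤ N.toNat := pvPC_le hqn
      have hxne : pn ^^^ qn ≠ 0 := fun hz => hne (by
        have := Nat.xor_eq_zero.mp hz
        exact this)
      have hxpos := pvPC_pos (pn ^^^ qn) (Nat.pos_of_ne_zero hxne)
      refine ⟨by omega, by omega, by omega, by omega, by omega⟩
    rw [hA, hAnone]
    simp only [first_pair_alt]
    rw [if_pos (by omega)]

@[simp]
theorem first_pair_raises : Claim_raises_first_pair := by
  unfold Claim_raises_first_pair
  exact ⟨fun N n_p n_q hd _ h hpre => absurd hpre (by unfold Pre_first_pair; unfold Raises_first_pair at h; omega), by decide⟩
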